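-- pv_equiv track=rewrite | github.com/GreatPyreneseDad/rose-glass-physicians-mountain | src/lenses/cultural_bridge_lens.py | _get_general_adaptations
-- ===== SOURCE A (Python) =====
-- from typing import List, Dict, Optional
--
-- def _get_general_adaptations(assumptions: List[str]) -> List[str]:
--     """Get general adaptations based on detected assumptions"""
--
--     adaptations = []
--
--     if any('autonomy' in a.lower() for a in assumptions):
--         adaptations.append(
--             "Consider asking: 'How does your family make important decisions together?'"
--         )
--
--     if any('disclosure' in a.lower() for a in assumptions):
--         adaptations.append(
--             "Consider asking: 'How would you like to receive information "
--             "about your loved one's condition?'"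
--         )
--
--     if any('time' in a.lower() for a in assumptions):
--         adaptations.append(
--             "Consider offering: 'Would your family like time to consult "
--             "before making this decision?'"
--         )
--
--     adaptations.append(
--         "Build relationship before crisis—ask about preferences early"
--     )
--
--     return adaptations
-- ===== SOURCE B (Python) =====
-- from typing import List
--
-- def _get_general_adaptations(assumptions: List[str]) -> List[str]:
--     """Get general adaptations based on detected assumptions"""
--     has_autonomy = has_disclosure = has_time = False
--     for a in assumptions:
--         low = a.lower()
--         if 'autonomy' in low:
--             has_autonomy = True
--         if 'disclosure' in low:
--             has_disclosure = True
--         if 'time' in low: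
--             has_time = True
--     adaptations = []
--     if has_autonomy:
--         adaptations.append(
--             "Consider asking: 'How does your family make important decisions together?'"
--         )
--     if has_disclosure:
--         adaptations.append(
--             "Consider asking: 'How would you like to receive information "
--             "about your loved one's condition?'"
--         )
--     if has_time:
--         adaptations.append(
--             "Consider offering: 'Would your family like time to consult "
--             "before making this decision?'"
--         )
--     adaptations.append(
--         "Build relationship before crisis—ask about preferences early"
--     )
--     return adaptations
-- ===== Notes on version B (the rewrite author's own statement) =====
-- stated objective: simpler
-- what changed: One single pass over the assumptions that lowercases each element once and sets three match flags, replacing A's three separate any(...) scans that each lowercase the whole list again.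
import Mathlib
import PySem

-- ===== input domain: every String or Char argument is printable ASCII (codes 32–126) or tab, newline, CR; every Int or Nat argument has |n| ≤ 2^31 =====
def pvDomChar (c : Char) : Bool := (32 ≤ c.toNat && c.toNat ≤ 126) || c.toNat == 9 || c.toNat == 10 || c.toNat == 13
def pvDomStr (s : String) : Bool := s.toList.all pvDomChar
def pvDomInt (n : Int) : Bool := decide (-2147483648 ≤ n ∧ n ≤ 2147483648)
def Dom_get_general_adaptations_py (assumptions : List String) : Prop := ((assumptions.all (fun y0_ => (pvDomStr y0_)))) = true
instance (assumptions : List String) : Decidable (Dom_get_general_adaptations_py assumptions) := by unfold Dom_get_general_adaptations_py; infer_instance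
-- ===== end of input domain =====

-- B replaces A's three separate any(...) scans by one single pass that lowercases each
-- element once and sets three match flags; output order is unchanged (objective: simpler).


def pvMsgAutonomy : String :=
  "Consider asking: 'How does your family make important decisions together?'"
def pvMsgDisclosure : String :=
  "Consider asking: 'How would you like to receive information about your loved one's condition?'"
def pvMsgTime : String :=
  "Consider offering: 'Would your family like time to consult before making this decision?'"
def pvMsgBuild : String :=
  "Build relationship before crisis—ask about preferences early"

-- ===== PORT A =====
-- three separate any(...) scans, each lowering every element, appends in branch order
def get_general_adaptations_py (assumptions : List String) : List String :=
  let adaptations : List String := []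
  let adaptations :=
    if assumptions.any (fun a => PySem.Str.isIn "autonomy" (PySem.Str.lower a)) then
      adaptations ++ [pvMsgAutonomy] else adaptations
  let adaptations :=
    if assumptions.any (fun a => PySem.Str.isIn "disclosure" (PySem.Str.lower a)) then
      adaptations ++ [pvMsgDisclosure] else adaptations
  let adaptations :=
    if assumptions.any (fun a => PySem.Str.isIn "time" (PySem.Str.lower a)) then
      adaptations ++ [pvMsgTime] else adaptations
  adaptations ++ [pvMsgBuild]

-- ===== PORT B =====
-- single fold over assumptions maintaining the three match flags; each element lowered once
def pvFlagsStep (f : Bool × Bool × Bool) (a : String) : Bool × Bool × Bool :=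
  let low := PySem.Str.lower a
  (f.1 || PySem.Str.isIn "autonomy" low,
   f.2.1 || PySem.Str.isIn "disclosure" low,
   f.2.2 || PySem.Str.isIn "time" low)

def get_general_adaptations_py_alt (assumptions : List String) : List String :=
  let f := assumptions.foldl pvFlagsStep (false, false, false)
  let adaptations : List String := []
  let adaptations := if f.1 then adaptations ++ [pvMsgAutonomy] else adaptations
  let adaptations := if f.2.1 then adaptations ++ [pvMsgDisclosure] else adaptations
  let adaptations := if f.2.2 then adaptations ++ [pvMsgTime] else adaptations
  adaptations ++ [pvMsgBuild]

-- ===== PRECONDITION & SPEC =====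
def Spec_get_general_adaptations_py (assumptions : List String) (out : List String) : Prop := out = get_general_adaptations_py_alt assumptions
instance (assumptions : List String) (out : List String) : Decidable (Spec_get_general_adaptations_py assumptions out) := by unfold Spec_get_general_adaptations_py; infer_instance

-- ===== CLAIM (what is proved, stated in full; the proofs are below) =====
def Claim_equal_get_general_adaptations_py : Prop := ∀ (assumptions : List String), Dom_get_general_adaptations_py assumptions → Spec_get_general_adaptations_py assumptions (get_general_adaptations_py assumptions)

-- ===== LEMMAS AND PROOFS =====

-- the flag fold computes the three any-scans
theorem pvFlags_eq (assumptions : List String) (b1 b2 b3 : Bool) :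
    assumptions.foldl pvFlagsStep (b1, b2, b3) =
      (b1 || assumptions.any (fun a => PySem.Str.isIn "autonomy" (PySem.Str.lower a)),
       b2 || assumptions.any (fun a => PySem.Str.isIn "disclosure" (PySem.Str.lower a)),
       b3 || assumptions.any (fun a => PySem.Str.isIn "time" (PySem.Str.lower a))) := by
  induction assumptions generalizing b1 b2 b3 with
  | nil => simp
  | cons x xs ih =>
      simp only [List.foldl_cons, List.any_cons, pvFlagsStep, ih]
      simp [Bool.or_assoc]

-- ===== VERDICT (by name: the statement is the Claim_ definition above) =====
theorem get_general_adaptations_py_spec : Claim_equal_get_general_adaptations_py := by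
  intro assumptions _
  unfold Spec_get_general_adaptations_py get_general_adaptations_py get_general_adaptations_py_alt
  rw [pvFlags_eq]
  simp
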